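-- pv_equiv track=rewrite | github.com/richardcui18/sequential-privacy-attacks | code/data_market/baseline_algorithm.py | generate_subsets_from_pi
-- ===== SOURCE A (Python) =====
-- from itertools import combinations
--
-- def generate_subsets_from_pi(state, max_size, min_size):
--     def get_subsets(dim, current_subset, current_size):
--         if dim == len(state):
--             if min_size <= current_size <= max_size:
--                 result.append(current_subset)
--             return
--
--         for size in range(1, len(state[dim]) + 1):
--             for combination in combinations(state[dim], size):
--                 new_size = current_size * size
--                 if new_size <= max_size:
--                     get_subsets(dim + 1, current_subset + [list(combination)], new_size)
--
--     result = []
--     get_subsets(0, [], 1)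
--     return result
-- ===== SOURCE B (Python) =====
-- from itertools import combinations, product
--
-- def generate_subsets_from_pi(state, max_size, min_size):
--     tables = [[(list(c), k) for k in range(1, len(dim) + 1)
--                for c in combinations(dim, k)] for dim in state]
--     result = []
--     for choice in product(*tables):
--         p = 1
--         for _, k in choice:
--             p *= k
--         if min_size <= p <= max_size:
--             result.append([c for c, _ in choice])
--     return result
-- ===== Notes on version B (the rewrite author's own statement) =====
-- stated objective: alternative
-- what changed: Replaces A's recursive accumulator DFS with max_size pruning by a flat sweep: precompute a per-dimension table of (combination, size) pairs, iterate the Cartesian product of these tables, and filter on the final size product (safe since all sizes are >= 1).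
import Mathlib
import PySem

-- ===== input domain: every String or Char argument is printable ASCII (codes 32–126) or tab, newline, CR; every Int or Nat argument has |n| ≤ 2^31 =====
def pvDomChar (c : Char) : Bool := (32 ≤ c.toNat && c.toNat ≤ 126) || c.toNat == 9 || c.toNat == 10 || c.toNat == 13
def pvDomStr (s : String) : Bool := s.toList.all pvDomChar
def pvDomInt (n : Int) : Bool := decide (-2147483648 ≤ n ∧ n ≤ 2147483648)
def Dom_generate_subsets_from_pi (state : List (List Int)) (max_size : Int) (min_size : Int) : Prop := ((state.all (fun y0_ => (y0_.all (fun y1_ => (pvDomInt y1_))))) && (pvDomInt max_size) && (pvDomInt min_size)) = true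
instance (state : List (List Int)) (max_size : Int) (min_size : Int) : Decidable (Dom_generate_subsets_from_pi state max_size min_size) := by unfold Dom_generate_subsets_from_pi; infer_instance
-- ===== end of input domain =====

-- B replaces A's recursive accumulator DFS by a flat Cartesian-product sweep over a
-- precomputed per-dimension table of (combination, size) pairs (objective: alternative).

-- ===== PORT A =====
-- itertools.combinations(l, k) in itertools order (shared library helper, used by both ports)
def pvCombos : List Int → Nat → List (List Int)
  | _, 0 => [[]]
  | [], _ + 1 => []
  | x :: xs, k + 1 => (pvCombos xs k).map (fun c => x :: c) ++ pvCombos xs (k + 1)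

-- the inner recursive get_subsets of A; `result` is threaded as the last argument
def pvGetSubsets (max_size min_size : Int) :
    List (List Int) → List (List Int) → Int → List (List (List Int)) → List (List (List Int))
  | [], current_subset, current_size, result =>
      if min_size ≤ current_size ∧ current_size ≤ max_size then result ++ [current_subset] else result
  | d :: rest, current_subset, current_size, result =>
      -- range(1, len(state[dim]) + 1)
      ((List.range d.length).map (· + 1)).foldl (fun r size =>
        (pvCombos d size).foldl (fun r combination =>
          if current_size * (size : Int) ≤ max_size then
            pvGetSubsets max_size min_size rest (current_subset ++ [combination])
              (current_size * (size : Int)) r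
          else r) r) result

def generate_subsets_from_pi (state : List (List Int)) (max_size : Int) (min_size : Int) : List (List (List Int)) :=
  pvGetSubsets max_size min_size state [] 1 []

-- ===== PORT B =====
-- per-dimension table: all non-empty combinations paired with their size
def pvTable (d : List Int) : List (List Int × Int) :=
  ((List.range d.length).map (· + 1)).flatMap (fun k => (pvCombos d k).map (fun c => (c, (k : Int))))

-- itertools.product (first iterable varies slowest)
def pvProduct : List (List (List Int × Int)) → List (List (List Int × Int))
  | [] => [[]]
  | t :: ts => t.flatMap (fun x => (pvProduct ts).map (fun ch => x :: ch))

-- p = 1; for _, k in choice: p *= k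
def pvProd (choice : List (List Int × Int)) : Int := choice.foldl (fun p x => p * x.2) 1

def generate_subsets_from_pi_alt (state : List (List Int)) (max_size : Int) (min_size : Int) : List (List (List Int)) :=
  (pvProduct (state.map pvTable)).foldl (fun r choice =>
    if min_size ≤ pvProd choice ∧ pvProd choice ≤ max_size then
      r ++ [choice.map Prod.fst] else r) []

-- ===== PRECONDITION & SPEC =====
def Spec_generate_subsets_from_pi (state : List (List Int)) (max_size : Int) (min_size : Int) (out : List (List (List Int))) : Prop := out = generate_subsets_from_pi_alt state max_size min_size
instance (state : List (List Int)) (max_size : Int) (min_size : Int) (out : List (List (List Int))) : Decidable (Spec_generate_subsets_from_pi state max_size min_size out) := by unfold Spec_generate_subsets_from_pi; infer_instance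

-- ===== CLAIM (what is proved, stated in full; the proofs are below) =====
def Claim_equal_generate_subsets_from_pi : Prop := ∀ (state : List (List Int)) (max_size : Int) (min_size : Int), Dom_generate_subsets_from_pi state max_size min_size → Spec_generate_subsets_from_pi state max_size min_size (generate_subsets_from_pi state max_size min_size)

-- ===== LEMMAS AND PROOFS =====

-- flatMap-form description of A's DFS (proof-only helper)
def pvA0 (max_size min_size : Int) : List (List Int) → List (List Int) → Int → List (List (List Int))
  | [], cur, sz => if min_size ≤ sz ∧ sz ≤ max_size then [cur] else []
  | d :: rest, cur, sz =>
      ((List.range d.length).map (· + 1)).flatMap (fun k =>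
        (pvCombos d k).flatMap (fun c =>
          if sz * (k : Int) ≤ max_size then pvA0 max_size min_size rest (cur ++ [c]) (sz * (k : Int)) else []))

theorem pvGetSubsets_eq_A0 (M m : Int) :
    ∀ (dims : List (List Int)) (cur : List (List Int)) (sz : Int) (res : List (List (List Int))),
      pvGetSubsets M m dims cur sz res = res ++ pvA0 M m dims cur sz := by
  intro dims
  induction dims with
  | nil =>
      intro cur sz res
      simp only [pvGetSubsets, pvA0]
      split <;> simp
  | cons d rest ih =>
      intro cur sz res
      simp only [pvGetSubsets, pvA0]
      rw [show (fun (r : List (List (List Int))) (size : Nat) =>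
            (pvCombos d size).foldl (fun r combination =>
              if sz * (size : Int) ≤ M then
                pvGetSubsets M m rest (cur ++ [combination]) (sz * (size : Int)) r
              else r) r)
          = (fun r size => r ++ (pvCombos d size).flatMap (fun c =>
              if sz * (size : Int) ≤ M then pvA0 M m rest (cur ++ [c]) (sz * (size : Int)) else [])) from ?_]
      · rw [PySem.List.foldl_append_eq_flatMap]
      · funext r k
        rw [show (fun (r : List (List (List Int))) (combination : List Int) =>
              if sz * (k : Int) ≤ M then
                pvGetSubsets M m rest (cur ++ [combination]) (sz * (k : Int)) r
              else r)
            = (fun r c => r ++ (if sz * (k : Int) ≤ M then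
                pvA0 M m rest (cur ++ [c]) (sz * (k : Int)) else [])) from ?_]
        · rw [PySem.List.foldl_append_eq_flatMap]
        · funext r c
          split <;> simp [ih]

theorem pvFlatMap_congr {α β : Type} (l : List α) (f g : α → List β)
    (h : ∀ x ∈ l, f x = g x) : l.flatMap f = l.flatMap g := by
  induction l with
  | nil => rfl
  | cons a t ih =>
      simp only [List.flatMap_cons]
      rw [h a (by simp), ih (fun x hx => h x (by simp [hx]))]

theorem pvProd_foldl_init (l : List (List Int × Int)) :
    ∀ a : Int, l.foldl (fun p x => p * x.2) a = a * l.foldl (fun p x => p * x.2) 1 := by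
  induction l with
  | nil => intro a; simp
  | cons x t ih =>
      intro a
      simp only [List.foldl_cons]
      rw [ih (a * x.2), ih (1 * x.2)]
      ring

theorem pvProd_cons (x : List Int × Int) (ch : List (List Int × Int)) :
    pvProd (x :: ch) = x.2 * pvProd ch := by
  simp only [pvProd, List.foldl_cons]
  rw [pvProd_foldl_init]
  ring

theorem pvTable_snd_pos (d : List Int) (x : List Int × Int) (hx : x ∈ pvTable d) : 1 ≤ x.2 := by
  simp only [pvTable, List.mem_flatMap, List.mem_map] at hx
  obtain ⟨k, hk, c, _, rfl⟩ := hx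
  obtain ⟨j, _, rfl⟩ := hk
  simp

theorem pvProd_pos (dims : List (List Int)) :
    ∀ ch ∈ pvProduct (dims.map pvTable), 1 ≤ pvProd ch := by
  induction dims with
  | nil =>
      intro ch hch
      simp only [List.map_nil, pvProduct] at hch
      simp only [List.mem_singleton] at hch
      subst hch
      simp [pvProd]
  | cons d rest ih =>
      intro ch hch
      simp only [List.map_cons, pvProduct, List.mem_flatMap, List.mem_map] at hch
      obtain ⟨x, hx, ch', hch', rfl⟩ := hch
      rw [pvProd_cons]
      have h1 := pvTable_snd_pos d x hx
      have h2 := ih ch' hch'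
      nlinarith

theorem pvA0_eq_flat (M m : Int) :
    ∀ (dims : List (List Int)) (cur : List (List Int)) (sz : Int), 1 ≤ sz →
      pvA0 M m dims cur sz =
        (pvProduct (dims.map pvTable)).flatMap (fun ch =>
          if m ≤ sz * pvProd ch ∧ sz * pvProd ch ≤ M then [cur ++ ch.map Prod.fst] else []) := by
  intro dims
  induction dims with
  | nil =>
      intro cur sz _
      simp [pvA0, pvProduct, pvProd]
  | cons d rest ih =>
      intro cur sz hsz
      simp only [pvA0, List.map_cons, pvProduct, pvTable]
      rw [List.flatMap_assoc, List.flatMap_assoc]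
      apply pvFlatMap_congr
      intro k hkmem
      have hk1 : (1 : Int) ≤ (k : Int) := by
        simp only [List.mem_map] at hkmem
        obtain ⟨j, _, rfl⟩ := hkmem
        push_cast
        omega
      rw [List.flatMap_map]
      apply pvFlatMap_congr
      intro c _
      rw [List.flatMap_map]
      by_cases hk : sz * (k : Int) ≤ M
      · rw [if_pos hk, ih (cur ++ [c]) (sz * (k : Int)) (by nlinarith)]
        apply pvFlatMap_congr
        intro ch _
        simp only [pvProd_cons]
        rw [show sz * (k : Int) * pvProd ch = sz * ((k : Int) * pvProd ch) from by ring]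
        split <;> simp
      · rw [if_neg hk]
        symm
        apply List.flatMap_eq_nil_iff.mpr
        intro ch hch
        simp only [pvProd_cons]
        rw [if_neg]
        rintro ⟨_, h2⟩
        have hp := pvProd_pos rest ch hch
        have hszk : (0 : Int) ≤ sz * (k : Int) := by nlinarith
        nlinarith [mul_nonneg hszk (by linarith : (0 : Int) ≤ pvProd ch - 1)]

-- ===== VERDICT (by name: the statement is the Claim_ definition above) =====
theorem generate_subsets_from_pi_spec : Claim_equal_generate_subsets_from_pi := by
  intro state max_size min_size _
  unfold Spec_generate_subsets_from_pi generate_subsets_from_pi generate_subsets_from_pi_alt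
  rw [pvGetSubsets_eq_A0, pvA0_eq_flat max_size min_size state [] 1 le_rfl]
  rw [show (fun (r : List (List (List Int))) (choice : List (List Int × Int)) =>
        if min_size ≤ pvProd choice ∧ pvProd choice ≤ max_size then
          r ++ [choice.map Prod.fst] else r)
      = (fun r choice => r ++ (if min_size ≤ pvProd choice ∧ pvProd choice ≤ max_size then
          [choice.map Prod.fst] else [])) from ?_]
  · rw [PySem.List.foldl_append_eq_flatMap]
    simp
  · funext r choice
    split <;> simp
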